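-- pv_equiv track=rewrite | github.com/maple135790/Codewars | 6kyu/Consecutive String.py | longest_consec
-- ===== SOURCE A (Python) =====
-- def longest_consec(strarr, k):
--     longest =""
--     maxlen =0
--     if k >len(strarr) or k <=0:
--         return ""
--     for i in range(len(strarr)):
--         c_maxlen =0
--         for j in range(k):
--             if i +k>len(strarr):
--                 break
--             c_maxlen +=len(strarr[i+j])
--         if maxlen < c_maxlen:
--             maxlen =c_maxlen
--             headPos =i
--     for i in range(headPos,headPos+k):
--         longest +=strarr[i]
--     return longest
-- ===== SOURCE B (Python) =====
-- def longest_consec(strarr, k):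
--     n = len(strarr)
--     if k > n or k <= 0:
--         return ""
--     cur = sum(len(s) for s in strarr[:k])
--     best, best_i = cur, 0
--     for i in range(1, n - k + 1):
--         cur += len(strarr[i + k - 1]) - len(strarr[i - 1])
--         if cur > best:
--             best, best_i = cur, i
--     return "".join(strarr[best_i:best_i + k])
-- ===== Notes on version B (the rewrite author's own statement) =====
-- stated objective: faster
-- what changed: Replaces A's per-position inner loop that re-sums k string lengths with a sliding window that updates the running window sum in O(1) per step, then joins the winning slice.
import Mathlib
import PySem

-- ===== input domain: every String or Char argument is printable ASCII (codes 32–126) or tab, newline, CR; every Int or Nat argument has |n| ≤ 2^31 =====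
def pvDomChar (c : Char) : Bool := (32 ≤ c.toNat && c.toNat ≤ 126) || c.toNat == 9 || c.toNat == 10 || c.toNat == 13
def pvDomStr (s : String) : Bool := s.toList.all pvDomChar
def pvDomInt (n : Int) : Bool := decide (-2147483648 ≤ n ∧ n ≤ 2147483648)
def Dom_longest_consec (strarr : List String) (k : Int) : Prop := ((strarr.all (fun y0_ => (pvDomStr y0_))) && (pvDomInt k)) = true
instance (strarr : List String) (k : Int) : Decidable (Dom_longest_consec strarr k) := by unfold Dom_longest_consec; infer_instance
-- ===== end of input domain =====

-- B replaces A's per-position O(k) re-summation with an O(n) sliding-window sum; equivalence of return values proved on Pre_ (A raises UnboundLocalError when 0<k≤len and all strings are empty).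


-- ===== PORT A =====
-- inner 'for j in range(k)' loop: running c_maxlen plus a 'broken' flag for the 'break'
def lcA_inner (strarr : List String) (n k i : Int) : Int :=
  ((PySem.List.pyRange 0 k 1).foldl
    (fun (st : Int × Bool) _j =>
      if st.2 then st
      else if i + k > n then (st.1, true)
      else (st.1 + PySem.Str.len ((PySem.List.pyGet? strarr (i + _j)).getD ""), false))
    (0, false)).1

-- body of the outer 'for i in range(len(strarr))' loop: state = (maxlen, headPos)
def lcA_step (strarr : List String) (n k : Int) (st : Int × Option Int) (i : Int) : Int × Option Int :=
  let c := lcA_inner strarr n k i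
  if st.1 < c then (c, some i) else st

def longest_consec (strarr : List String) (k : Int) : String :=
  let n : Int := strarr.length
  if k > n ∨ k ≤ 0 then ""
  else
    let st := (PySem.List.pyRange 0 n 1).foldl (lcA_step strarr n k) (0, none)
    match st.2 with
    | none => ""   -- Python raises UnboundLocalError here (headPos unassigned); excluded by Pre_
    | some h =>
      (PySem.List.pyRange h (h + k) 1).foldl
        (fun acc i => acc ++ (PySem.List.pyGet? strarr i).getD "") ""

-- ===== PORT B =====
-- cur = sum(len(s) for s in strarr[:k])
def lcB_init (strarr : List String) (k : Int) : Int :=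
  (PySem.List.slice strarr (some 0) (some k)).foldl (fun a s => a + PySem.Str.len s) 0

-- body of the sliding-window loop: state = (cur, best, best_i)
def lcB_step (strarr : List String) (k : Int) (st : Int × Int × Int) (i : Int) : Int × Int × Int :=
  let cur := st.1 + PySem.Str.len ((PySem.List.pyGet? strarr (i + k - 1)).getD "")
                  - PySem.Str.len ((PySem.List.pyGet? strarr (i - 1)).getD "")
  if cur > st.2.1 then (cur, cur, i) else (cur, st.2.1, st.2.2)

def longest_consec_alt (strarr : List String) (k : Int) : String :=
  let n : Int := strarr.length
  if k > n ∨ k ≤ 0 then ""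
  else
    let c0 := lcB_init strarr k
    let st := (PySem.List.pyRange 1 (n - k + 1) 1).foldl (lcB_step strarr k) (c0, c0, 0)
    PySem.Str.join "" (PySem.List.slice strarr (some st.2.2) (some (st.2.2 + k)))

-- ===== PRECONDITION & SPEC =====
-- Pre_ excludes exactly the inputs where A raises UnboundLocalError: 0 < k ≤ len(strarr) with every string empty (headPos is never assigned).
def Pre_longest_consec (strarr : List String) (k : Int) : Prop :=
  k > strarr.length ∨ k ≤ 0 ∨ ∃ s ∈ strarr, s ≠ ""
instance (strarr : List String) (k : Int) : Decidable (Pre_longest_consec strarr k) := by unfold Pre_longest_consec; infer_instance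

def pvWitness_longest_consec : List String × Int := (["ab", "c", "de"], 2)

def Spec_longest_consec (strarr : List String) (k : Int) (out : String) : Prop := out = longest_consec_alt strarr k
instance (strarr : List String) (k : Int) (out : String) : Decidable (Spec_longest_consec strarr k out) := by unfold Spec_longest_consec; infer_instance

-- ===== CLAIM (what is proved, stated in full; the proofs are below) =====
def Claim_equal_longest_consec : Prop := ∀ (strarr : List String) (k : Int), Dom_longest_consec strarr k → Pre_longest_consec strarr k → Spec_longest_consec strarr k (longest_consec strarr k)

-- ===== LEMMAS AND PROOFS =====

-- window sum of string lengths: sum of len over strarr[i:i+K]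
def lcW (strarr : List String) (K i : Nat) : Int :=
  ((((strarr.map PySem.Str.len).drop i).take K)).sum

lemma lcW_nonneg (strarr : List String) (K i : Nat) : 0 ≤ lcW strarr K i := by
  unfold lcW
  apply List.sum_nonneg
  intro x hx
  have hx' : x ∈ strarr.map PySem.Str.len := List.mem_of_mem_drop (List.mem_of_mem_take hx)
  obtain ⟨s, _, rfl⟩ := List.mem_map.mp hx'
  simp [PySem.Str.len]

-- a window, as a map over range
lemma lc_window_map {α : Type} (l : List α) (d : α) (K i : Nat) (h : i + K ≤ l.length) :
    (List.range K).map (fun t => l.getD (i + t) d) = (l.drop i).take K := by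
  induction K generalizing i with
  | zero => simp
  | succ K ih =>
    rw [List.range_succ, List.map_append, ih i (by omega), List.take_add_one]
    have h1 : i + K < l.length := by omega
    have h2 : K < (l.drop i).length := by simp; omega
    simp [List.getD, h1]

-- a fold whose step fixes the state s stays at s
lemma lc_foldl_fix {σ β : Type} (f : σ → β → σ) (l : List β) (s : σ) (h : ∀ b, f s b = s) :
    l.foldl f s = s := by
  induction l with
  | nil => rfl
  | cons a t ih => simp only [List.foldl_cons, h a]; exact ih

lemma lcA_inner_zero (strarr : List String) (n k i : Int) (hk : 0 < k) (h : i + k > n) :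
    lcA_inner strarr n k i = 0 := by
  unfold lcA_inner
  rw [PySem.List.pyRange_one_cons hk]
  simp only [List.foldl_cons, if_neg (by simp : ¬(false = true)), if_pos h]
  rw [lc_foldl_fix _ _ _ (by intro b; simp)]

lemma lcA_inner_eq (strarr : List String) (k : Int) (i : Nat) (hk : 0 < k)
    (h : (i : Int) + k ≤ strarr.length) :
    lcA_inner strarr strarr.length k i = lcW strarr k.toNat i := by
  unfold lcA_inner
  have hnb : ¬ ((i : Int) + k > strarr.length) := by omega
  have hstep : ∀ (l : List Int) (c : Int),
      l.foldl
        (fun (st : Int × Bool) _j =>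
          if st.2 then st
          else if (i : Int) + k > (strarr.length : Int) then (st.1, true)
          else (st.1 + PySem.Str.len ((PySem.List.pyGet? strarr ((i : Int) + _j)).getD ""), false))
        (c, false)
      = (l.foldl (fun c j => c + PySem.Str.len ((PySem.List.pyGet? strarr ((i : Int) + j)).getD "")) c, false) := by
    intro l
    induction l with
    | nil => intro c; rfl
    | cons a t ih =>
      intro c
      simp only [List.foldl_cons]
      rw [if_neg (show ¬(false = true) by simp), if_neg hnb]
      exact ih _
  rw [hstep]
  simp only
  rw [PySem.List.foldl_add, PySem.List.pyRange_one]
  have hK : ((k.toNat : Int)) = k := Int.toNat_of_nonneg (by omega)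
  have hiK : i + k.toNat ≤ strarr.length := by omega
  unfold lcW
  rw [← lc_window_map (strarr.map PySem.Str.len) 0 k.toNat i (by simpa using hiK)]
  rw [show (k - 0).toNat = k.toNat by omega, zero_add, List.map_map]
  congr 1
  apply List.map_congr_left
  intro t ht
  have ht' : t < k.toNat := List.mem_range.mp ht
  have hidx : i + t < strarr.length := by omega
  simp only [Function.comp]
  rw [show (i : Int) + (0 + (t : Int)) = ((i + t : Nat) : Int) by push_cast; ring]
  rw [PySem.List.pyGet?_natCast]
  simp [List.getD, hidx]

-- sliding identity
lemma lcW_slide (strarr : List String) (K i : Nat) (hK : 0 < K) (h : i + 1 + K ≤ strarr.length) :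
    lcW strarr K (i + 1)
      = lcW strarr K i - PySem.Str.len (strarr.getD i "") + PySem.Str.len (strarr.getD (i + K) "") := by
  have h1 : i < strarr.length := by omega
  have h2 : i + K < strarr.length := by omega
  obtain ⟨K', rfl⟩ : ∃ K', K = K' + 1 := ⟨K - 1, by omega⟩
  unfold lcW
  have h1' : i < (strarr.map PySem.Str.len).length := by simpa using h1
  have hdk : K' < (List.drop (i + 1) (strarr.map PySem.Str.len)).length := by simp; omega
  rw [List.drop_eq_getElem_cons h1', List.take_succ_cons, List.take_add_one]
  have hsome : (List.drop (i + 1) (strarr.map PySem.Str.len))[K']? = some ((strarr.map PySem.Str.len)[i + 1 + K']'(by simp; omega)) := by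
    rw [List.getElem?_eq_getElem hdk]
    congr 1
    rw [List.getElem_drop]
  rw [hsome]
  simp [List.getD, h1, h2, show i + 1 + K' = i + (K' + 1) by omega]

-- fold of stepA dominates every inner value it sees and its start
lemma lcA_fold_ge (strarr : List String) (n k : Int) (l : List Int) (st : Int × Option Int) :
    st.1 ≤ ((l.foldl (lcA_step strarr n k) st).1) ∧
    ∀ i ∈ l, lcA_inner strarr n k i ≤ ((l.foldl (lcA_step strarr n k) st).1) := by
  induction l generalizing st with
  | nil => simp
  | cons a t ih =>
    simp only [List.foldl_cons]
    constructor
    · refine le_trans ?_ (ih (lcA_step strarr n k st a)).1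
      by_cases h : st.1 < lcA_inner strarr n k a
      · simp [lcA_step, h]; omega
      · simp [lcA_step, h]
    · intro i hi
      rcases List.mem_cons.mp hi with rfl | hi
      · refine le_trans ?_ (ih (lcA_step strarr n k st i)).1
        by_cases h : st.1 < lcA_inner strarr n k i
        · simp [lcA_step, h]
        · simp [lcA_step, h]; omega
      · exact (ih (lcA_step strarr n k st a)).2 i hi

-- tail of A's outer loop (windows overflowing the array) never updates the state
lemma lcA_tail_skip (strarr : List String) (n k : Int) (hk : 0 < k) (l : List Int)
    (hl : ∀ i ∈ l, i + k > n) (st : Int × Option Int) (hst : 0 ≤ st.1) :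
    l.foldl (lcA_step strarr n k) st = st := by
  induction l with
  | nil => rfl
  | cons a t ih =>
    simp only [List.foldl_cons]
    have : lcA_step strarr n k st a = st := by
      unfold lcA_step
      rw [lcA_inner_zero strarr n k a hk (hl a (by simp))]
      simp; omega
    rw [this]
    exact ih (fun i hi => hl i (by simp [hi]))

lemma lcB_init_eq (strarr : List String) (k : Int) (hk : 0 < k) :
    lcB_init strarr k = lcW strarr k.toNat 0 := by
  unfold lcB_init lcW
  rw [PySem.List.slice_toNat strarr (by omega) (by omega)]
  rw [PySem.List.foldl_add]
  simp only [List.map_take, List.drop_zero, zero_add]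
  rfl

-- prefixes of A's outer fold and of B's sliding fold
def lcA_to (strarr : List String) (k m : Int) : Int × Option Int :=
  (PySem.List.pyRange 0 m 1).foldl (lcA_step strarr strarr.length k) (0, none)
def lcB_to (strarr : List String) (k m : Int) : Int × Int × Int :=
  (PySem.List.pyRange 1 m 1).foldl (lcB_step strarr k) (lcB_init strarr k, lcB_init strarr k, 0)

-- the coupling invariant between A's outer fold and B's sliding fold
lemma lc_inv (strarr : List String) (k : Int) (hk : 0 < k) (hkn : k ≤ (strarr.length : Int))
    (m : Nat) (hm : (m : Int) ≤ (strarr.length : Int) - k) :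
    (lcB_to strarr k ((m : Int) + 1)).1 = lcW strarr k.toNat m ∧
    (lcB_to strarr k ((m : Int) + 1)).2.1 = (lcA_to strarr k ((m : Int) + 1)).1 ∧
    0 ≤ (lcB_to strarr k ((m : Int) + 1)).2.1 ∧
    0 ≤ (lcB_to strarr k ((m : Int) + 1)).2.2 ∧
    (lcB_to strarr k ((m : Int) + 1)).2.2 ≤ (m : Int) ∧
    ((lcA_to strarr k ((m : Int) + 1))
        = ((lcB_to strarr k ((m : Int) + 1)).2.1, some ((lcB_to strarr k ((m : Int) + 1)).2.2)) ∨
      ((lcA_to strarr k ((m : Int) + 1)) = (0, none) ∧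
        (lcB_to strarr k ((m : Int) + 1)).2.1 = 0 ∧ (lcB_to strarr k ((m : Int) + 1)).2.2 = 0)) := by
  induction m with
  | zero =>
    have hA : lcA_to strarr k 1 = lcA_step strarr strarr.length k (0, none) 0 := by
      unfold lcA_to
      rw [PySem.List.pyRange_one_cons (by omega : (0:Int) < 1),
          show (0:Int) + 1 = 1 from by ring,
          PySem.List.pyRange_one_eq_nil (by omega : (1:Int) ≤ 1)]
      rfl
    have hB : lcB_to strarr k 1 = (lcB_init strarr k, lcB_init strarr k, 0) := by
      unfold lcB_to
      rw [PySem.List.pyRange_one_eq_nil (by omega : (1:Int) ≤ 1)]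
      rfl
    have hc : lcA_inner strarr strarr.length k 0 = lcW strarr k.toNat 0 := by
      have := lcA_inner_eq strarr k 0 hk (by push_cast; omega)
      simpa using this
    have hinit := lcB_init_eq strarr k hk
    simp only [Nat.cast_zero, zero_add]
    rw [hA, hB, hinit]
    simp only [lcA_step, hc]
    by_cases h0 : (0:Int) < lcW strarr k.toNat 0
    · rw [if_pos h0]
      refine ⟨?_, ?_, ?_, ?_, ?_, Or.inl ?_⟩
      all_goals first | trivial | rfl | exact le_of_lt h0
    · rw [if_neg h0]
      have hnn := lcW_nonneg strarr k.toNat 0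
      have hz : lcW strarr k.toNat 0 = 0 := by omega
      refine ⟨?_, ?_, ?_, ?_, ?_, Or.inr ⟨?_, ?_, ?_⟩⟩
      all_goals trivial
  | succ m ih =>
    obtain ⟨hB1, hBA, hBnn, hbi0, hbim, hdisj⟩ := ih (by omega)
    have hK : ((k.toNat : Int)) = k := Int.toNat_of_nonneg (by omega)
    have hA : lcA_to strarr k (((m+1 : Nat) : Int) + 1)
        = lcA_step strarr strarr.length k (lcA_to strarr k ((m : Int) + 1)) ((m : Int) + 1) := by
      unfold lcA_to
      rw [show (((m+1 : Nat) : Int) + 1) = ((m : Int) + 1) + 1 by push_cast; ring,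
          PySem.List.pyRange_one_succ_right (by omega), List.foldl_append]
      rfl
    have hB : lcB_to strarr k (((m+1 : Nat) : Int) + 1)
        = lcB_step strarr k (lcB_to strarr k ((m : Int) + 1)) ((m : Int) + 1) := by
      unfold lcB_to
      rw [show (((m+1 : Nat) : Int) + 1) = ((m : Int) + 1) + 1 by push_cast; ring,
          PySem.List.pyRange_one_succ_right (by omega), List.foldl_append]
      rfl
    have hc : lcA_inner strarr strarr.length k ((m : Int) + 1) = lcW strarr k.toNat (m + 1) := by
      have := lcA_inner_eq strarr k (m + 1) hk (by push_cast; omega)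
      rw [show (((m + 1 : Nat)) : Int) = (m : Int) + 1 by push_cast; ring] at this
      exact this
    -- the incremental update computes the next window sum
    have hidx1 : m + k.toNat < strarr.length := by omega
    have hidx2 : m < strarr.length := by omega
    have hcur : (lcB_to strarr k ((m : Int) + 1)).1
          + PySem.Str.len ((PySem.List.pyGet? strarr (((m : Int) + 1) + k - 1)).getD "")
          - PySem.Str.len ((PySem.List.pyGet? strarr (((m : Int) + 1) - 1)).getD "")
        = lcW strarr k.toNat (m + 1) := by
      rw [hB1]
      rw [show ((m : Int) + 1) + k - 1 = ((m + k.toNat : Nat) : Int) by push_cast; omega,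
          show ((m : Int) + 1) - 1 = ((m : Nat) : Int) by ring,
          PySem.List.pyGet?_natCast, PySem.List.pyGet?_natCast]
      rw [lcW_slide strarr k.toNat m (by omega) (by omega)]
      simp [List.getD, hidx1, hidx2]
      try ring
    rw [hA, hB]
    simp only [lcA_step, lcB_step, hc, hcur]
    by_cases hup : (lcA_to strarr k ((m : Int) + 1)).1 < lcW strarr k.toNat (m + 1)
    · rw [if_pos hup, if_pos (show lcW strarr k.toNat (m + 1) > (lcB_to strarr k ((m : Int) + 1)).2.1 from by rw [hBA]; exact hup)]
      have hnn : 0 ≤ lcW strarr k.toNat (m + 1) := lcW_nonneg strarr k.toNat (m + 1)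
      exact ⟨rfl, rfl, hnn, by positivity, le_refl _, Or.inl rfl⟩
    · rw [if_neg hup, if_neg (show ¬ (lcW strarr k.toNat (m + 1) > (lcB_to strarr k ((m : Int) + 1)).2.1) from by rw [hBA]; exact hup)]
      refine ⟨rfl, hBA, hBnn, hbi0, le_trans hbim (by omega), ?_⟩
      rcases hdisj with h | h
      · exact Or.inl h
      · exact Or.inr ⟨h.1, h.2.1, h.2.2⟩

-- a '+=' string accumulation over a list of indices, on the List Char side
lemma lc_strcat (g : Int → String) (l : List Int) (acc : String) :
    (l.foldl (fun a i => a ++ g i) acc).toList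
      = acc.toList ++ (l.map (fun i => (g i).toList)).flatten := by
  induction l generalizing acc with
  | nil => simp
  | cons a t ih => simp [ih]

-- ''.join is concatenation
lemma lc_join_nil (l : List (List Char)) : PySem.Chars.join [] l = l.flatten := by
  show ([] : List Char).intercalate l = l.flatten
  simp [List.intercalate]
  induction l with
  | nil => simp
  | cons x t ih => cases t <;> simp_all [List.intersperse]

-- both window outputs coincide: A's '+=' loop over range(h, h+k) vs B's join of a slice
lemma lc_out_eq (strarr : List String) (k : Int) (hk : 0 < k) (h' : Nat)
    (h : (h' : Int) + k ≤ strarr.length) :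
    (PySem.List.pyRange (h' : Int) ((h' : Int) + k) 1).foldl
        (fun acc i => acc ++ (PySem.List.pyGet? strarr i).getD "") ""
      = PySem.Str.join "" (PySem.List.slice strarr (some (h' : Int)) (some ((h' : Int) + k))) := by
  apply String.toList_inj.mp
  rw [lc_strcat, PySem.Str.toList_join, PySem.List.slice_toNat strarr (by omega) (by omega)]
  have hKk : ((h' : Int) + k - (h' : Int)).toNat = k.toNat := by omega
  have hK2 : ((h' : Int) + k).toNat - ((h' : Int)).toNat = k.toNat := by omega
  rw [PySem.List.pyRange_one, hKk, hK2, List.map_map]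
  have hmap : ((List.range k.toNat).map
        ((fun i => ((PySem.List.pyGet? strarr i).getD "").toList) ∘ fun (t : Nat) => (h' : Int) + (t : Int)))
      = ((List.range k.toNat).map (fun t => strarr.getD (h' + t) "")).map String.toList := by
    rw [List.map_map]
    apply List.map_congr_left
    intro t ht
    have ht' : t < k.toNat := List.mem_range.mp ht
    have hidx : h' + t < strarr.length := by omega
    simp only [Function.comp]
    rw [show (h' : Int) + (t : Int) = ((h' + t : Nat) : Int) by push_cast; ring,
        PySem.List.pyGet?_natCast]
    simp [List.getD, hidx]
  rw [hmap, lc_window_map strarr "" k.toNat h' (by omega)]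
  have : ("" : String).toList = [] := rfl
  rw [this, lc_join_nil]
  simp

-- ===== VERDICT (by name: the statement is the Claim_ definition above) =====
theorem longest_consec_spec : Claim_equal_longest_consec := by
  unfold Claim_equal_longest_consec
  intro strarr k _ hpre
  unfold Spec_longest_consec
  by_cases hg : k > (strarr.length : Int) ∨ k ≤ 0
  · simp only [longest_consec, longest_consec_alt]
    rw [if_pos hg, if_pos hg]
  · have hkn : k ≤ (strarr.length : Int) := by by_contra h; exact hg (Or.inl (by omega))
    have hk : 0 < k := by by_contra h; exact hg (Or.inr (by omega))
    obtain ⟨s, hs, hsne⟩ : ∃ s ∈ strarr, s ≠ "" := by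
      rcases hpre with h | h | h
      · omega
      · omega
      · exact h
    have hm0 : ((((strarr.length : Int) - k).toNat : Nat) : Int) = (strarr.length : Int) - k :=
      Int.toNat_of_nonneg (by omega)
    set m0 : Nat := ((strarr.length : Int) - k).toNat with hm0def
    obtain ⟨hB1, hBA, hBnn, hbi0, hbim, hdisj⟩ := lc_inv strarr k hk hkn m0 (by omega)
    obtain ⟨p, hp, hsp⟩ := List.getElem_of_mem hs
    have hlenp : 0 < PySem.Str.len (strarr[p]'hp) := by
      simp only [PySem.Str.len]
      have hne : (strarr[p]'hp).toList ≠ [] := by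
        intro hnil
        apply hsne
        rw [← hsp]
        exact String.toList_inj.mp (by rw [hnil]; rfl)
      have := List.length_pos_iff.mpr hne
      exact_mod_cast this
    set i0 : Nat := min p m0 with hi0def
    have hw0 : 0 < lcW strarr k.toNat i0 := by
      have hi0p : i0 ≤ p := min_le_left _ _
      have hi0m : i0 ≤ m0 := min_le_right _ _
      have hpi : p - i0 < k.toNat := by omega
      unfold lcW
      have hbound : p - i0 < (((strarr.map PySem.Str.len).drop i0).take k.toNat).length := by
        rw [List.length_take, List.length_drop, List.length_map]
        omega
      have helem : ((((strarr.map PySem.Str.len).drop i0).take k.toNat)[p - i0]'hbound)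
          = PySem.Str.len (strarr[p]'hp) := by
        rw [List.getElem_take, List.getElem_drop, List.getElem_map]
        have hip : i0 + (p - i0) = p := by omega
        simp only [hip]
      have hmem : PySem.Str.len (strarr[p]'hp) ∈ ((strarr.map PySem.Str.len).drop i0).take k.toNat := by
        rw [← helem]
        exact List.getElem_mem _
      refine lt_of_lt_of_le hlenp (List.single_le_sum ?_ _ hmem)
      intro x hx
      have hx' : x ∈ strarr.map PySem.Str.len := List.mem_of_mem_drop (List.mem_of_mem_take hx)
      obtain ⟨t, _, rfl⟩ := List.mem_map.mp hx'
      simp [PySem.Str.len]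
    have hsplit : (PySem.List.pyRange 0 (strarr.length : Int) 1).foldl
          (lcA_step strarr (strarr.length : Int) k) (0, none)
        = lcA_to strarr k ((m0 : Int) + 1) := by
      rw [PySem.List.pyRange_one_append 0 ((m0 : Int) + 1) (strarr.length : Int) (by omega) (by omega),
          List.foldl_append]
      exact lcA_tail_skip strarr (strarr.length : Int) k hk _
        (fun i hi => by rw [PySem.List.mem_pyRange_one] at hi; omega) _
        (by show 0 ≤ (lcA_to strarr k ((m0 : Int) + 1)).1
            rw [← hBA]; exact hBnn)
    have hge := (lcA_fold_ge strarr (strarr.length : Int) k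
        (PySem.List.pyRange 0 ((m0 : Int) + 1) 1) (0, none)).2 (i0 : Int)
        (by rw [PySem.List.mem_pyRange_one]; constructor <;> omega)
    rw [lcA_inner_eq strarr k i0 hk (by omega)] at hge
    have hpos : 0 < (lcA_to strarr k ((m0 : Int) + 1)).1 := lt_of_lt_of_le hw0 hge
    rcases hdisj with hA | ⟨hA0, _, _⟩
    swap
    · exfalso
      rw [hA0] at hpos
      exact lt_irrefl 0 hpos
    · have hbk : ((lcB_to strarr k ((m0 : Int) + 1)).2.2.toNat : Int)
          = (lcB_to strarr k ((m0 : Int) + 1)).2.2 := Int.toNat_of_nonneg hbi0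
      have hLHS : longest_consec strarr k
          = (PySem.List.pyRange ((lcB_to strarr k ((m0 : Int) + 1)).2.2)
              ((lcB_to strarr k ((m0 : Int) + 1)).2.2 + k) 1).foldl
              (fun acc i => acc ++ (PySem.List.pyGet? strarr i).getD "") "" := by
        simp only [longest_consec]
        rw [if_neg hg, hsplit, hA]
      have hRHS : longest_consec_alt strarr k
          = PySem.Str.join "" (PySem.List.slice strarr
              (some ((lcB_to strarr k ((m0 : Int) + 1)).2.2))
              (some ((lcB_to strarr k ((m0 : Int) + 1)).2.2 + k))) := by
        simp only [longest_consec_alt]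
        rw [if_neg hg, show (strarr.length : Int) - k + 1 = (m0 : Int) + 1 by omega]
        rfl
      rw [hLHS, hRHS, ← hbk]
      exact lc_out_eq strarr k hk _ (by omega)
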